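-- pv_equiv track=rewrite | github.com/Math-Gomes/ProgramacaoCompetitiva | Aula05/A - Error Correction/a.py | has_parity_property
-- ===== SOURCE A (Python) =====
-- def has_parity_property(matrix):
--     for row in matrix:
--         if sum(row) % 2 != 0:
--             return False
--
--     for col in [*zip(*matrix)]:
--         if sum(col) % 2 != 0:
--             return False
--
--     return True
-- ===== SOURCE B (Python) =====
-- def has_parity_property(matrix):
--     if not matrix:
--         return True
--     first = matrix[0]
--     ok = sum(first) % 2 == 0
--     par = [x % 2 == 1 for x in first]
--     for row in matrix[1:]:
--         if sum(row) % 2 != 0: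
--             ok = False
--         par = [p ^ (x % 2 == 1) for p, x in zip(par, row)]
--     return ok and not any(par)
-- ===== Notes on version B (the rewrite author's own statement) =====
-- stated objective: alternative
-- what changed: B makes a single pass over the rows, checking each row's sum parity inline and XOR-folding a list of column parities (truncated by zip to the shortest row seen), instead of a second loop over a materialized transpose; no transpose is built.
import Mathlib
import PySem

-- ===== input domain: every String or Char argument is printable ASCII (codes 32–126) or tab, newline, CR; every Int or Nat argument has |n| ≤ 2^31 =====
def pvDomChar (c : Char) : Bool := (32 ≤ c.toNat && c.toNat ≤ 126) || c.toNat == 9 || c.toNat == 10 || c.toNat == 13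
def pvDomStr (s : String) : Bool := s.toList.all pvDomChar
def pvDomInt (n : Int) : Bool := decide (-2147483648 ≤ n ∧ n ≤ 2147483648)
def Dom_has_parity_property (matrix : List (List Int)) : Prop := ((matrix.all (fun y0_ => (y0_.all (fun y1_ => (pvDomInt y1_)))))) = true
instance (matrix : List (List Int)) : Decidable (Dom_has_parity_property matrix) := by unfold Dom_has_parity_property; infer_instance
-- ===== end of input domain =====

-- B replaces A's second loop over a materialized zip-transpose by a single row pass that
-- XOR-folds truncated column parities while checking row-sum parity inline (alternative decomposition).


-- ===== PORT A =====
-- zip(*matrix): Python's zip over the rows — peels the head of every row while all rows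
-- are nonempty (so columns are truncated to the shortest row); zip(*[]) = [].
def pyZipT : List (List Int) → List (List Int)
  | [] => []
  | r :: rs =>
    if h : ((r :: rs).all (fun x => !x.isEmpty)) = true then
      ((r :: rs).map List.headI) :: pyZipT ((r :: rs).map List.tail)
    else []
termination_by rows => rows.headI.length
decreasing_by
  simp_all [List.all_cons]
  cases r with
  | nil => simp at h
  | cons a as => simp

-- the early 'return False' in each of A's two 'for' loops = List.any over that loop's items
def has_parity_property (matrix : List (List Int)) : Bool :=
  if matrix.any (fun row => !(PySem.Int.mod row.sum 2 == 0)) then false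
  else if (pyZipT matrix).any (fun col => !(PySem.Int.mod col.sum 2 == 0)) then false
  else true

-- ===== PORT B =====
def pvOdd (x : Int) : Bool := PySem.Int.mod x 2 == 1

-- one step of B's row loop: update the rows-all-even flag and XOR the row's element
-- parities into the tracked column parities (zip truncates to the shorter list)
def pvStep (st : Bool × List Bool) (row : List Int) : Bool × List Bool :=
  (if !(PySem.Int.mod row.sum 2 == 0) then false else st.1,
   List.zipWith (fun p x => xor p (pvOdd x)) st.2 row)

def has_parity_property_alt (matrix : List (List Int)) : Bool :=
  match matrix with
  | [] => true
  | first :: rest =>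
    let fin := rest.foldl pvStep ((PySem.Int.mod first.sum 2 == 0), first.map pvOdd)
    fin.1 && !(fin.2.any id)

-- ===== PRECONDITION & SPEC =====
def Spec_has_parity_property (matrix : List (List Int)) (out : Bool) : Prop := out = has_parity_property_alt matrix
instance (matrix : List (List Int)) (out : Bool) : Decidable (Spec_has_parity_property matrix out) := by unfold Spec_has_parity_property; infer_instance

-- ===== CLAIM (what is proved, stated in full; the proofs are below) =====
def Claim_equal_has_parity_property : Prop := ∀ (matrix : List (List Int)), Dom_has_parity_property matrix → Spec_has_parity_property matrix (has_parity_property matrix)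

-- ===== LEMMAS AND PROOFS =====

-- the XOR-parity of column j of rows, defined exactly when j is in range of EVERY row
def colOdd? (rows : List (List Int)) (j : Nat) : Option Bool :=
  rows.foldr (fun row acc =>
    match row[j]?, acc with
    | some x, some b => some (xor (pvOdd x) b)
    | _, _ => none) (some false)

theorem colOdd?_cons (r : List Int) (rs : List (List Int)) (j : Nat) :
    colOdd? (r :: rs) j =
      (match r[j]?, colOdd? rs j with
       | some x, some b => some (xor (pvOdd x) b)
       | _, _ => none) := rfl

theorem pvOdd_add (x s : Int) : pvOdd (x + s) = xor (pvOdd x) (pvOdd s) := by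
  simp only [pvOdd, PySem.Int.mod_eq_emod_of_pos (show (0:Int) < 2 by omega)]
  rcases Int.emod_two_eq_zero_or_one x with hx | hx <;>
    rcases Int.emod_two_eq_zero_or_one s with hs | hs <;>
      simp [Int.add_emod, hx, hs]

theorem pvOdd_eq_not (s : Int) : pvOdd s = !(PySem.Int.mod s 2 == 0) := by
  simp only [pvOdd, PySem.Int.mod_eq_emod_of_pos (show (0:Int) < 2 by omega)]
  rcases Int.emod_two_eq_zero_or_one s with hs | hs <;> simp [hs]

theorem pvOdd_sum (l : List Int) : pvOdd l.sum = l.foldr (fun x b => xor (pvOdd x) b) false := by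
  induction l with
  | nil => decide
  | cons x xs ih => simp [List.sum_cons, pvOdd_add, ih]

theorem foldl_pvStep_fst (rs : List (List Int)) (b : Bool) (p : List Bool) :
    (rs.foldl pvStep (b, p)).1 = (b && !(rs.any (fun row => !(PySem.Int.mod row.sum 2 == 0)))) := by
  induction rs generalizing b p with
  | nil => simp
  | cons r rs ih =>
    simp only [List.foldl_cons, List.any_cons, pvStep, ih]
    cases hX : (PySem.Int.mod r.sum 2 == 0) <;> cases b <;>
      cases hY : (rs.any fun row => !PySem.Int.mod row.sum 2 == 0) <;> rfl

theorem foldl_pvStep_snd_getElem? (rs : List (List Int)) (b : Bool) (p : List Bool) (j : Nat) :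
    (rs.foldl pvStep (b, p)).2[j]? =
      (match p[j]?, colOdd? rs j with
       | some q, some c => some (xor q c)
       | _, _ => none) := by
  induction rs generalizing b p with
  | nil =>
    simp only [List.foldl_nil, colOdd?, List.foldr_nil]
    cases p[j]? <;> simp
  | cons r rs ih =>
    simp only [List.foldl_cons, ih, colOdd?_cons]
    show (match (pvStep (b, p) r).2[j]?, colOdd? rs j with
          | some q, some c => some (xor q c) | _, _ => none) = _
    simp only [pvStep, List.getElem?_zipWith]
    cases hp : p[j]? <;> cases hr : r[j]? <;> cases hc : colOdd? rs j <;>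
      simp [Bool.xor_assoc, Bool.xor_comm, Bool.xor_left_comm]

theorem colOdd?_tail (rows : List (List Int)) (j : Nat) :
    colOdd? rows (j + 1) = colOdd? (rows.map List.tail) j := by
  induction rows with
  | nil => rfl
  | cons r rs ih =>
    simp only [List.map_cons, colOdd?_cons, ih]
    have : r[j+1]? = r.tail[j]? := by cases r <;> simp
    rw [this]

theorem colOdd?_of_empty_mem (rows : List (List Int)) (j : Nat)
    (h : ∃ r ∈ rows, r = ([] : List Int)) : colOdd? rows j = none := by
  induction rows with
  | nil => simp at h
  | cons r rs ih =>
    rw [colOdd?_cons]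
    rcases h with ⟨r', hmem, hr'⟩
    rcases List.mem_cons.mp hmem with h1 | h1
    · subst h1; subst hr'; simp
    · rw [ih ⟨r', h1, hr'⟩]
      cases r[j]? <;> rfl

theorem colOdd?_zero_of_all_ne (rows : List (List Int))
    (h : ∀ r ∈ rows, r ≠ ([] : List Int)) :
    colOdd? rows 0 = some ((rows.map List.headI).foldr (fun x b => xor (pvOdd x) b) false) := by
  induction rows with
  | nil => rfl
  | cons r rs ih =>
    rw [colOdd?_cons, ih (fun r' hr' => h r' (List.mem_cons_of_mem _ hr'))]
    cases r with
    | nil => exact absurd rfl (h [] (List.mem_cons_self))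
    | cons a as => simp [List.headI]

theorem pyZipT_map_getElem? (rows : List (List Int)) :
    rows ≠ [] → ∀ j, ((pyZipT rows).map (fun col => pvOdd col.sum))[j]? = colOdd? rows j := by
  induction rows using pyZipT.induct with
  | case1 => intro hne; exact absurd rfl hne
  | case2 r rs h ih =>
    intro _ j
    rw [pyZipT, dif_pos h]
    cases j with
    | zero =>
      simp only [List.map_cons, List.getElem?_cons_zero]
      have hall : ∀ r' ∈ r :: rs, r' ≠ ([] : List Int) := by
        intro r' hr' hcon
        simp only [List.all_eq_true, Bool.not_eq_eq_eq_not] at h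
        have := h r' hr'
        rw [hcon] at this
        simp at this
      rw [colOdd?_zero_of_all_ne _ hall, pvOdd_sum]
      rfl
    | succ k =>
      simp only [List.map_cons, List.getElem?_cons_succ]
      have := ih (by simp) k
      simp only [List.map_cons] at this
      rw [this, colOdd?_tail, List.map_cons]
  | case3 r rs h =>
    intro _ j
    rw [pyZipT, dif_neg h]
    simp only [List.map_nil, List.getElem?_nil]
    have h' : ∃ x ∈ r :: rs, x = ([] : List Int) := by
      by_contra hc
      apply h
      simp only [List.all_eq_true]
      intro x hx
      cases hx2 : x with
      | nil => exact absurd ⟨x, hx, hx2⟩ hc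
      | cons a as => simp
    exact (colOdd?_of_empty_mem _ j h').symm

theorem foldl_pvStep_snd (first : List Int) (rest : List (List Int)) (b : Bool) :
    (rest.foldl pvStep (b, first.map pvOdd)).2 =
      (pyZipT (first :: rest)).map (fun col => pvOdd col.sum) := by
  apply List.ext_getElem?
  intro j
  rw [foldl_pvStep_snd_getElem?, pyZipT_map_getElem? _ (by simp) j, colOdd?_cons]
  rw [List.getElem?_map]
  cases first[j]? <;> cases colOdd? rest j <;> rfl

-- ===== VERDICT (by name: the statement is the Claim_ definition above) =====
theorem has_parity_property_spec : Claim_equal_has_parity_property := by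
  intro matrix _
  unfold Spec_has_parity_property has_parity_property has_parity_property_alt
  cases matrix with
  | nil => simp [pyZipT]
  | cons first rest =>
    show (if ((first :: rest).any fun row => !PySem.Int.mod row.sum 2 == 0) = true then false
          else if ((pyZipT (first :: rest)).any fun col => !PySem.Int.mod col.sum 2 == 0) = true
          then false else true)
        = ((rest.foldl pvStep ((PySem.Int.mod first.sum 2 == 0), first.map pvOdd)).1 &&
           !((rest.foldl pvStep ((PySem.Int.mod first.sum 2 == 0), first.map pvOdd)).2.any id))
    rw [foldl_pvStep_fst, foldl_pvStep_snd]
    simp only [List.any_map, List.any_cons]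
    have hfe : (id ∘ fun col : List Int => pvOdd col.sum)
        = (fun col : List Int => !(PySem.Int.mod col.sum 2 == 0)) := by
      funext col; simp [pvOdd_eq_not]
    rw [hfe]
    have hif : ∀ (c t : Bool), (if c = true then false else t) = (!c && t) := by
      intro c t; cases c <;> simp
    simp only [hif]
    simp [Bool.not_or, Bool.and_assoc]
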